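-- pv_equiv track=rewrite | github.com/eyuparslana/substringIsland | met_case1.py | get_island_count
-- ===== SOURCE A (Python) =====
-- def get_island_count(entry, substring):
--     s_len = len(substring)
--     tmp_list = ['0'] * len(entry)
--
--     for i in range(len(entry)):
--         if entry[i] == substring[0] and entry[i: i + s_len] == substring[0:s_len]:
--             for j in range(i, i + s_len):
--                 tmp_list[j] = entry[j]
--
--     splited_islands = ''.join(tmp_list).split('0')
--     island_count = 0
--
--     for island in splited_islands:
--         if island:
--             island_count += 1
--
--     return island_count, tmp_list
-- ===== SOURCE B (Python) =====
-- def _occurrences(entry, substring):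
--     # all (possibly overlapping) occurrence start positions, via the built-in scanner
--     starts = []
--     if substring:
--         p = entry.find(substring)
--         while p != -1:
--             starts.append(p)
--             p = entry.find(substring, p + 1)
--     return starts
--
--
-- def _merge(starts, m):
--     # union of the intervals [p, p+m) as a list of disjoint merged intervals
--     intervals = []
--     for p in starts:
--         if intervals and p <= intervals[-1][1]:
--             intervals[-1] = (intervals[-1][0], p + m)
--         else:
--             intervals.append((p, p + m))
--     return intervals
--
--
-- def get_island_count(entry, substring):
--     intervals = _merge(_occurrences(entry, substring), len(substring))
--     tmp_list = []
--     pos = 0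
--     count = 0
--     for l, r in intervals:
--         tmp_list.extend('0' * (l - pos))
--         tmp_list.extend(entry[l:r])
--         count += sum(1 for w in entry[l:r].split('0') if w)
--         pos = r
--     tmp_list.extend('0' * (len(entry) - pos))
--     return count, tmp_list
-- ===== Notes on version B (the rewrite author's own statement) =====
-- stated objective: faster
-- what changed: B finds occurrence starts with str.find, merges them into a list of disjoint covered intervals in one pass, and derives both the island count (per merged interval, via its slice) and the output list (built segment-wise from the intervals) — instead of A's per-position first-char test with slice comparison, cell-by-cell marking of a '0'-array, and a global join/split counting pass.
import Mathlib
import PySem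

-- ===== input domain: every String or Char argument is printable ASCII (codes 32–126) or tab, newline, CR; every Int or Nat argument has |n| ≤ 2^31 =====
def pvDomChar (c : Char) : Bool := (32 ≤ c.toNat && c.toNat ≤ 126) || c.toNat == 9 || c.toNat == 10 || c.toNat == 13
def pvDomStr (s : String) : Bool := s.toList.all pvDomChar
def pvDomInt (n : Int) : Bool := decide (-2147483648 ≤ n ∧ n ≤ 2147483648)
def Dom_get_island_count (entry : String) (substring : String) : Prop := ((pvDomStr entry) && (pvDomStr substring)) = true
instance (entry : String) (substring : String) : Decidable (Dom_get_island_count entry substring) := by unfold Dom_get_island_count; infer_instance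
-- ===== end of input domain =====

-- B computes the union of occurrence intervals (found with str.find, merged in one pass) and
-- derives both the count and the masked list from the merged intervals, instead of A's
-- per-position slice comparison with cell marking and a global join/split pass (objective: faster).

-- ===== PORT A =====
def get_island_count (entry : String) (substring : String) : Int × List String :=
  let e := entry.toList
  let s := substring.toList
  let sLen : Int := PySem.Str.len substring
  let tmp :=
    (PySem.List.pyRange 0 (PySem.Str.len entry) 1).foldl (fun tmp i =>
      if PySem.List.pyGet? e i = PySem.List.pyGet? s 0 ∧
         PySem.List.slice e (some i) (some (i + sLen)) = PySem.List.slice s (some 0) (some sLen) then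
        (PySem.List.pyRange i (i + sLen) 1).foldl
          (fun t j => PySem.List.pySetD t j (String.singleton (PySem.List.pyGetD e j ' '))) tmp
      else tmp)
      (PySem.List.pyRepeat ["0"] (PySem.Str.len entry))
  -- ''.join(tmp_list).split('0'): the separator "0" is nonempty, so split? is always `some`
  let splited := (PySem.Str.split? (PySem.Str.join "" tmp) "0").getD []
  let islandCount : Int := splited.foldl (fun c island => if island ≠ "" then c + 1 else c) 0
  (islandCount, tmp)

-- ===== PORT B =====
-- the `while p != -1` loop over `p = entry.find(substring, p + 1)`; successive p values strictly
-- increase, so the loop runs at most len(entry) + 2 times — the fuel makes that explicit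
def altFindStarts (e s : List Char) (p : Int) : Nat → List Int
  | 0 => []
  | fuel + 1 =>
    if p = -1 then [] else p :: altFindStarts e s (PySem.Chars.findFrom e s (p + 1) none) fuel

-- _occurrences(entry, substring)
def altOccurrences (entry : String) (substring : String) : List Int :=
  if substring.toList = [] then []
  else altFindStarts entry.toList substring.toList
    (PySem.Chars.find entry.toList substring.toList) (entry.toList.length + 2)

-- _merge(starts, m): `intervals[-1]` is pyGetD/pySetD at index -1
def altMerge (starts : List Int) (m : Int) : List (Int × Int) :=
  starts.foldl (fun acc p =>
    if acc ≠ [] ∧ p ≤ (PySem.List.pyGetD acc (-1) ((0 : Int), (0 : Int))).2 then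
      PySem.List.pySetD acc (-1) ((PySem.List.pyGetD acc (-1) ((0 : Int), (0 : Int))).1, p + m)
    else acc ++ [(p, p + m)]) []

def get_island_count_alt (entry : String) (substring : String) : Int × List String :=
  let e := entry.toList
  let m : Int := PySem.Str.len substring
  let intervals := altMerge (altOccurrences entry substring) m
  -- the for-loop over intervals with state (tmp_list, pos, count);
  -- entry[l:r] is the char slice of e, and its .split('0') is split? of that string
  let res := intervals.foldl (fun (acc : List String × Int × Int) lr =>
      (acc.1 ++ List.replicate (lr.1 - acc.2.1).toNat "0" ++
         (PySem.List.slice e (some lr.1) (some lr.2)).map String.singleton,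
       lr.2,
       acc.2.2 + ((PySem.Str.split? (String.ofList (PySem.List.slice e (some lr.1) (some lr.2))) "0").getD
           []).foldl (fun c w => if w ≠ "" then c + 1 else c) 0))
    (([] : List String), (0 : Int), (0 : Int))
  (res.2.2, res.1 ++ List.replicate (PySem.Str.len entry - res.2.1).toNat "0")

-- ===== PRECONDITION & SPEC =====
-- Pre_ excludes exactly the inputs where A raises: an empty substring with a nonempty entry
-- makes `substring[0]` raise IndexError on the first loop iteration.
def Pre_get_island_count (entry : String) (substring : String) : Prop :=
  substring ≠ "" ∨ entry = ""
instance (entry : String) (substring : String) : Decidable (Pre_get_island_count entry substring) := by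
  unfold Pre_get_island_count; infer_instance
def pvWitness_get_island_count : String × String := ("abcab0ab", "ab")

def Spec_get_island_count (entry : String) (substring : String) (out : Int × List String) : Prop :=
  out = get_island_count_alt entry substring
instance (entry : String) (substring : String) (out : Int × List String) :
    Decidable (Spec_get_island_count entry substring out) := by
  unfold Spec_get_island_count; infer_instance

-- ===== CLAIM (what is proved, stated in full; the proofs are below) =====
def Claim_equal_get_island_count : Prop :=
  ∀ (entry : String) (substring : String), Dom_get_island_count entry substring →
    Pre_get_island_count entry substring →
    Spec_get_island_count entry substring (get_island_count entry substring)

-- ===== LEMMAS AND PROOFS =====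

-- ---- small string facts ----
lemma ofList_eq_empty_iff (cs : List Char) : String.ofList cs = "" ↔ cs = [] := by
  constructor
  · intro h
    have h2 := congrArg String.toList h
    simpa using h2
  · rintro rfl; rfl

-- ---- A's per-position condition is exactly "substring occurs at i" ----
lemma condA_iff (e s : List Char) (hs : s ≠ []) (k : Nat) :
    (PySem.List.pyGet? e (k : Int) = PySem.List.pyGet? s 0 ∧
      PySem.List.slice e (some (k : Int)) (some ((k : Int) + (s.length : Int))) =
        PySem.List.slice s (some 0) (some (s.length : Int)))
    ↔ s <+: List.drop k e := by
  have h2 : PySem.List.slice e (some (k : Int)) (some ((k : Int) + (s.length : Int))) =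
      (e.drop k).take s.length := PySem.List.slice_natCast_add e k s.length
  have h3 : PySem.List.slice s (some 0) (some (s.length : Int)) = s := by
    simp [PySem.List.slice_to_natCast]
  constructor
  · rintro ⟨-, hsl⟩
    rw [h2, h3] at hsl
    exact List.prefix_iff_eq_take.mpr hsl.symm
  · intro hpre
    refine ⟨?_, by rw [h2, h3]; exact (List.prefix_iff_eq_take.mp hpre).symm⟩
    obtain ⟨c, s', rfl⟩ : ∃ c s', s = c :: s' := by
      cases s with
      | nil => exact absurd rfl hs
      | cons c s' => exact ⟨c, s', rfl⟩
    obtain ⟨r, hr⟩ := hpre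
    have he0 : e[k]? = some c := by
      have : (List.drop k e)[0]? = some c := by rw [← hr]; rfl
      simpa [List.getElem?_drop] using this
    simp [PySem.List.pyGet?_natCast, PySem.List.pyGet?_zero, he0]

lemma occ_eq (e s : List Char) (hs : s ≠ []) :
    (List.range e.length).filter (fun k : Nat =>
        decide (PySem.List.pyGet? e (k : Int) = PySem.List.pyGet? s 0 ∧
          PySem.List.slice e (some (k : Int)) (some ((k : Int) + (s.length : Int))) =
            PySem.List.slice s (some 0) (some (s.length : Int))))
    = (List.range (e.length + 1)).filter (fun i => decide (s <+: List.drop i e)) := by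
  have hpt : ∀ k ∈ List.range e.length,
      (decide (PySem.List.pyGet? e (k : Int) = PySem.List.pyGet? s 0 ∧
        PySem.List.slice e (some (k : Int)) (some ((k : Int) + (s.length : Int))) =
          PySem.List.slice s (some 0) (some (s.length : Int))) : Bool)
        = decide (s <+: List.drop k e) :=
    fun k _ => decide_eq_decide.mpr (condA_iff e s hs k)
  rw [List.filter_congr hpt]
  rw [List.range_succ, List.filter_append]
  have hlast : (List.filter (fun i => decide (s <+: List.drop i e)) [e.length]) = [] := by
    simpa [List.drop_length] using hs
  rw [hlast, List.append_nil]

-- ---- the find/findFrom loop returns exactly the match positions, in order ----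
lemma findFrom_top (e s : List Char) :
    PySem.Chars.findFrom e s ((e.length + 1 : Nat) : Int) none = -1 := by
  simp only [PySem.Chars.findFrom]
  have h1 : ¬ (((e.length + 1 : Nat) : Int) < 0) := by push_cast; omega
  rw [if_neg h1]
  rw [if_pos (by push_cast; omega)]

lemma starts_spec (e s : List Char) (hs : s ≠ []) :
    ∀ (fuel : Nat) (k : Nat), k ≤ e.length + 1 → e.length + 1 - k < fuel →
      altFindStarts e s (PySem.Chars.findFrom e s (k : Int) none) fuel
        = ((List.range' k (e.length + 1 - k)).filter
            (fun i => decide (s <+: List.drop i e))).map (fun k : Nat => (k : Int)) := by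
  intro fuel
  induction fuel with
  | zero => intro k hk hf; omega
  | succ f ih =>
    intro k hk hf
    by_cases hkn : k ≤ e.length
    · by_cases hF : PySem.Chars.findFrom e s (k : Int) none = -1
      · rw [hF]
        rw [show altFindStarts e s (-1) (f + 1) = [] from by simp [altFindStarts]]
        have hno : ¬ s <:+: List.drop k e :=
          (PySem.Chars.findFrom_natCast_eq_neg_one_iff e s k hkn).mp hF
        symm
        rw [List.map_eq_nil_iff, List.filter_eq_nil_iff]
        intro i hi
        simp only [decide_eq_true_eq]
        intro hpre
        apply hno
        have hki : k ≤ i := (List.mem_range'_1.mp hi).1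
        obtain ⟨r, hr⟩ := hpre
        refine ⟨(List.drop k e).take (i - k), r, ?_⟩
        have hd : List.drop (i - k) (List.drop k e) = List.drop i e := by
          rw [List.drop_drop]; congr 1; omega
        calc (List.drop k e).take (i - k) ++ s ++ r
            = (List.drop k e).take (i - k) ++ (s ++ r) := by rw [List.append_assoc]
          _ = (List.drop k e).take (i - k) ++ List.drop i e := by rw [hr]
          _ = (List.drop k e).take (i - k) ++ List.drop (i - k) (List.drop k e) := by rw [hd]
          _ = List.drop k e := List.take_append_drop _ _
      · obtain ⟨hkF, hpre, hmin⟩ := PySem.Chars.findFrom_natCast_spec e s k hkn hF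
        have hF0 : (0 : Int) ≤ PySem.Chars.findFrom e s (k : Int) none :=
          le_trans (Int.natCast_nonneg k) hkF
        set p := (PySem.Chars.findFrom e s (k : Int) none).toNat with hp
        have hFp : PySem.Chars.findFrom e s (k : Int) none = (p : Int) :=
          (Int.toNat_of_nonneg hF0).symm
        have hkp : k ≤ p := by omega
        have hpn : p < e.length := by
          by_contra hcon
          push_neg at hcon
          rw [List.drop_eq_nil_of_le hcon] at hpre
          exact hs (List.prefix_nil.mp hpre)
        rw [show altFindStarts e s (PySem.Chars.findFrom e s (k : Int) none) (f + 1)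
              = PySem.Chars.findFrom e s (k : Int) none ::
                  altFindStarts e s
                    (PySem.Chars.findFrom e s (PySem.Chars.findFrom e s (k : Int) none + 1) none) f
            from by simp [altFindStarts, hF]]
        have hF1 : PySem.Chars.findFrom e s (k : Int) none + 1 = ((p + 1 : Nat) : Int) := by
          rw [hFp]; push_cast; ring
        rw [hF1, ih (p + 1) (by omega) (by omega)]
        have hra : List.range' k (p - k) ++ List.range' (k + 1 * (p - k)) (e.length + 1 - p)
            = List.range' k ((p - k) + (e.length + 1 - p)) := by
          rw [List.range'_append]
        have hsplit : List.range' k (e.length + 1 - k)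
            = List.range' k (p - k) ++ List.range' p (e.length + 1 - p) := by
          calc List.range' k (e.length + 1 - k)
              = List.range' k ((p - k) + (e.length + 1 - p)) := by
                rw [show e.length + 1 - k = (p - k) + (e.length + 1 - p) from by omega]
            _ = List.range' k (p - k) ++ List.range' (k + 1 * (p - k)) (e.length + 1 - p) :=
                hra.symm
            _ = List.range' k (p - k) ++ List.range' p (e.length + 1 - p) := by
                rw [show k + 1 * (p - k) = p from by omega]
        rw [hsplit, List.filter_append]
        have h1 : (List.range' k (p - k)).filter (fun i => decide (s <+: List.drop i e)) = [] := by
          rw [List.filter_eq_nil_iff]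
          intro i hi
          have := List.mem_range'_1.mp hi
          simpa using hmin i this.1 (by omega)
        have h2 : List.range' p (e.length + 1 - p) = p :: List.range' (p + 1) (e.length - p) := by
          rw [show e.length + 1 - p = (e.length - p) + 1 from by omega]
          rfl
        rw [h1, h2]
        have h3 : decide (s <+: List.drop p e) = true := by simpa using hpre
        simp only [List.filter_cons, h3, if_pos, List.nil_append, List.map_cons]
        rw [hFp, show e.length + 1 - (p + 1) = e.length - p from by omega]
    · have hk1 : k = e.length + 1 := by omega
      rw [hk1, findFrom_top e s]
      simp [altFindStarts]

lemma starts_eq (e s : List Char) (hs : s ≠ []) :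
    altFindStarts e s (PySem.Chars.find e s) (e.length + 2)
      = ((List.range (e.length + 1)).filter
          (fun i => decide (s <+: List.drop i e))).map (fun k : Nat => (k : Int)) := by
  have h0 : PySem.Chars.find e s = PySem.Chars.findFrom e s ((0 : Nat) : Int) none := by
    simp
  rw [h0, starts_spec e s hs (e.length + 2) 0 (by omega) (by omega)]
  simp [List.range_eq_range']

-- ---- marking writes only singleton cells: the whole tmp list is a mapped char list ----
lemma setFold_sing (e : List Char) :
    ∀ (js : List Int), (∀ j ∈ js, 0 ≤ j) → ∀ l : List Char,
      js.foldl (fun t j => PySem.List.pySetD t j (String.singleton (PySem.List.pyGetD e j ' ')))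
          (l.map String.singleton)
        = (js.foldl (fun t j => PySem.List.pySetD t j (PySem.List.pyGetD e j ' ')) l).map
            String.singleton := by
  intro js
  induction js with
  | nil => intro _ l; simp
  | cons j js ih =>
    intro hjs l
    have hj : (0 : Int) ≤ j := hjs j (by simp)
    simp only [List.foldl_cons]
    rw [PySem.List.pySetD_of_nonneg _ _ hj, PySem.List.pySetD_of_nonneg _ _ hj,
      ← List.map_set]
    exact ih (fun j' hj' => hjs j' (List.mem_cons_of_mem _ hj')) _

lemma markFold_sing (e : List Char) (sLen : Int) :
    ∀ (ps : List Int), (∀ p ∈ ps, 0 ≤ p) → ∀ l : List Char,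
      ps.foldl (fun tmp i =>
          (PySem.List.pyRange i (i + sLen) 1).foldl
            (fun t j => PySem.List.pySetD t j (String.singleton (PySem.List.pyGetD e j ' '))) tmp)
        (l.map String.singleton)
      = (ps.foldl (fun tmp i =>
          (PySem.List.pyRange i (i + sLen) 1).foldl
            (fun t j => PySem.List.pySetD t j (PySem.List.pyGetD e j ' ')) tmp) l).map
          String.singleton := by
  intro ps
  induction ps with
  | nil => intro _ l; simp
  | cons p ps ih =>
    intro hps l
    have hp : (0 : Int) ≤ p := hps p (by simp)
    simp only [List.foldl_cons]
    rw [setFold_sing e _ (fun j hj => le_trans hp (PySem.List.mem_pyRange_one.mp hj).1) l]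
    exact ih (fun p' hp' => hps p' (List.mem_cons_of_mem _ hp')) _

-- ---- split-on-'0' counting equals run counting ----
def splitOnChar : List Char → List (List Char)
  | [] => [[]]
  | c :: l => if c = '0' then [] :: splitOnChar l else (splitOnChar l).modifyHead (fun x => c :: x)

def runsAux : List Char → Bool → Int
  | [], _ => 0
  | c :: l, inRun => if c = '0' then runsAux l false else (if inRun then 0 else 1) + runsAux l true

lemma modifyHead_id (L : List (List Char)) : L.modifyHead (fun x => x) = L := by
  cases L <;> simp

lemma go_spec :
    ∀ (fuel : Nat) (l cur : List Char) (acc : List (List Char)), l.length < fuel →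
      PySem.Chars.splitOn.go ['0'] fuel l cur acc
        = acc.reverse ++ (splitOnChar l).modifyHead (fun x => cur.reverse ++ x) := by
  intro fuel
  induction fuel with
  | zero => intro l cur acc h; omega
  | succ f ih =>
    intro l cur acc h
    cases l with
    | nil => simp [PySem.Chars.splitOn.go, splitOnChar]
    | cons c rest =>
      by_cases hc : c = '0'
      · have hpref : (['0'] : List Char).isPrefixOf (c :: rest) = true := by
          simp [List.isPrefixOf, hc]
        rw [show PySem.Chars.splitOn.go ['0'] (f + 1) (c :: rest) cur acc
              = PySem.Chars.splitOn.go ['0'] f (List.drop 1 (c :: rest)) []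
                  (cur.reverse :: acc)
            from by simp [PySem.Chars.splitOn.go, hpref]]
        simp only [List.drop_one, List.tail_cons]
        rw [ih rest [] (cur.reverse :: acc) (by simpa using Nat.lt_of_succ_lt_succ h)]
        simp [splitOnChar, hc, modifyHead_id]
      · have hpref : (['0'] : List Char).isPrefixOf (c :: rest) = false := by
          simp [List.isPrefixOf]
          intro hcon
          exact absurd hcon.symm hc
        rw [show PySem.Chars.splitOn.go ['0'] (f + 1) (c :: rest) cur acc
              = PySem.Chars.splitOn.go ['0'] f rest (c :: cur) acc
            from by simp [PySem.Chars.splitOn.go, hpref]]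
        rw [ih rest (c :: cur) acc (by simpa using Nat.lt_of_succ_lt_succ h)]
        simp only [splitOnChar, hc, if_neg hc]
        cases hsp : splitOnChar rest with
        | nil => simp
        | cons hd tl => simp

lemma splitOn_eq (l : List Char) : PySem.Chars.splitOn l ['0'] = splitOnChar l := by
  unfold PySem.Chars.splitOn
  rw [go_spec (l.length + 1) l [] [] (by omega)]
  simp [modifyHead_id]

lemma split_struct (l : List Char) :
    ∃ h t, splitOnChar l = h :: t ∧
      ((t.countP (fun cs => decide (cs ≠ [])) : Nat) : Int) = runsAux l true ∧
      (if h = [] then (0 : Int) else 1) + ((t.countP (fun cs => decide (cs ≠ [])) : Nat) : Int)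
        = runsAux l false := by
  induction l with
  | nil => exact ⟨[], [], rfl, by simp [runsAux], by simp [runsAux]⟩
  | cons c l ih =>
    obtain ⟨h, t, hst, h1, h2⟩ := ih
    by_cases hc : c = '0'
    · refine ⟨[], h :: t, by simp [splitOnChar, hc, hst], ?_, ?_⟩
      · rw [List.countP_cons]
        simp only [runsAux, if_pos hc]
        rw [← h2]
        by_cases hh : h = [] <;> simp [hh] <;> push_cast <;> omega
      · rw [List.countP_cons]
        simp only [runsAux, if_pos hc, if_pos rfl]
        rw [← h2]
        by_cases hh : h = [] <;> simp [hh] <;> push_cast <;> omega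
    · refine ⟨c :: h, t, by simp [splitOnChar, hc, hst], ?_, ?_⟩
      · simpa [runsAux, hc] using h1
      · simp only [runsAux, if_neg hc, if_neg (List.cons_ne_nil c h)]
        rw [← h1]
        simp

lemma split_runs (l : List Char) :
    (((splitOnChar l).countP (fun cs => decide (cs ≠ [])) : Nat) : Int) = runsAux l false := by
  obtain ⟨h, t, hst, _, h2⟩ := split_struct l
  rw [hst, List.countP_cons, ← h2]
  by_cases hh : h = [] <;> simp [hh] <;> push_cast <;> omega

-- the count a Python `sum(1 for w in x.split('0') if w)` computes, for any char list
lemma countSeg_eq (l : List Char) :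
    ((PySem.Str.split? (String.ofList l) "0").getD []).foldl
        (fun c w => if w ≠ "" then c + 1 else c) (0 : Int) = runsAux l false := by
  have hsplit : PySem.Str.split? (String.ofList l) "0"
      = some ((splitOnChar l).map String.ofList) := by
    simp only [PySem.Str.split?, PySem.Chars.split?]
    rw [if_neg (by simp)]
    simp [splitOn_eq]
  rw [hsplit]
  simp only [Option.getD_some]
  rw [PySem.List.foldl_ite_add_one (p := fun island : String => island ≠ "")]
  simp only [zero_add]
  rw [List.countP_map, ← split_runs l]
  congr 1
  apply List.countP_congr
  intro cs _
  simp only [Function.comp, ne_eq, decide_eq_true_eq]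
  exact not_congr (ofList_eq_empty_iff cs)

lemma countA_eq (l : List Char) :
    ((PySem.Str.split? (PySem.Str.join "" (l.map String.singleton)) "0").getD []).foldl
        (fun c island => if island ≠ "" then c + 1 else c) (0 : Int) = runsAux l false := by
  have hjoin : PySem.Str.join "" (l.map String.singleton) = String.ofList l := by
    simp only [PySem.Str.join]
    congr 1
    rw [List.map_map]
    have hcomp : (String.toList ∘ String.singleton) = fun c : Char => [c] := by
      funext c; simp
    rw [hcomp]
    simpa using PySem.Chars.join_nil_singletons l
  rw [hjoin, countSeg_eq]

-- ---- proof-side model of B's merge fold ----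
def mstep (m : Int) (acc : List (Int × Int)) (p : Int) : List (Int × Int) :=
  if acc ≠ [] ∧ p ≤ (PySem.List.pyGetD acc (-1) ((0 : Int), (0 : Int))).2 then
    PySem.List.pySetD acc (-1) ((PySem.List.pyGetD acc (-1) ((0 : Int), (0 : Int))).1, p + m)
  else acc ++ [(p, p + m)]

lemma altMerge_eq (starts : List Int) (m : Int) :
    altMerge starts m = starts.foldl (mstep m) [] := rfl

lemma pySetD_neg_one_eq {α : Type} (xs : List α) (v : α) (h : xs ≠ []) :
    PySem.List.pySetD xs (-1) v = xs.dropLast ++ [v] := by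
  have hl : 0 < xs.length := List.length_pos_iff.mpr h
  have h1 : PySem.List.pyIdx? xs.length (-1) = some (xs.length - 1) := by
    simp [PySem.List.pyIdx?]; omega
  simp only [PySem.List.pySetD, PySem.List.pySet?, h1, Option.map_some, Option.getD_some]
  rw [List.set_eq_take_append_cons_drop, if_pos (by omega)]
  rw [show xs.length - 1 + 1 = xs.length from by omega]
  simp [List.dropLast_eq_take]

lemma mstep_append (m : Int) (acc acc₀ : List (Int × Int)) (p : Int) (h : acc₀ ≠ []) :
    mstep m (acc ++ acc₀) p = acc ++ mstep m acc₀ p := by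
  have hne : acc ++ acc₀ ≠ [] := by simp [h]
  have hget : PySem.List.pyGetD (acc ++ acc₀) (-1) ((0:Int),(0:Int))
      = PySem.List.pyGetD acc₀ (-1) ((0:Int),(0:Int)) := by
    rw [PySem.List.pyGetD_neg_one _ _ hne, PySem.List.pyGetD_neg_one _ _ h,
      List.getLast_append_of_ne_nil hne h]
  unfold mstep
  rw [hget]
  by_cases hc : p ≤ (PySem.List.pyGetD acc₀ (-1) ((0:Int),(0:Int))).2
  · rw [if_pos ⟨hne, hc⟩, if_pos ⟨h, hc⟩,
      pySetD_neg_one_eq _ _ hne, pySetD_neg_one_eq _ _ h,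
      List.dropLast_append_of_ne_nil (l' := acc) h, List.append_assoc]
  · rw [if_neg (by tauto), if_neg (by tauto), List.append_assoc]

lemma mstep_ne_nil (m : Int) (acc : List (Int × Int)) (p : Int) : mstep m acc p ≠ [] := by
  unfold mstep
  split
  · rename_i hc
    rw [pySetD_neg_one_eq _ _ hc.1]
    simp
  · simp

lemma foldl_mstep_append (m : Int) :
    ∀ (xs : List Int) (acc acc₀ : List (Int × Int)), acc₀ ≠ [] →
      xs.foldl (mstep m) (acc ++ acc₀) = acc ++ xs.foldl (mstep m) acc₀ := by
  intro xs
  induction xs with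
  | nil => intro acc acc₀ h; rfl
  | cons x xs ih =>
    intro acc acc₀ h
    simp only [List.foldl_cons]
    rw [mstep_append m acc acc₀ x h, ih acc _ (mstep_ne_nil m acc₀ x)]

-- ---- Nat-level interval machinery ----
def absorbN (m : Nat) : Nat → List Nat → Nat × List Nat
  | r, [] => (r, [])
  | r, p :: ps => if p ≤ r then absorbN m (p + m) ps else (r, p :: ps)

lemma absorbN_len (m : Nat) : ∀ (ps : List Nat) (r : Nat), ((absorbN m r ps).2).length ≤ ps.length := by
  intro ps
  induction ps with
  | nil => intro r; simp [absorbN]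
  | cons p ps ih =>
    intro r
    simp only [absorbN]
    split
    · exact le_trans (ih (p + m)) (by simp)
    · simp

def mergeN (m : Nat) : List Nat → List (Nat × Nat)
  | [] => []
  | p :: ps => (p, (absorbN m (p + m) ps).1) :: mergeN m (absorbN m (p + m) ps).2
termination_by l => l.length
decreasing_by exact Nat.lt_succ_of_le (absorbN_len m ps (p + m))

def segN (e : List Char) (l r : Nat) : List Char := (e.drop l).take (r - l)

def covB (m : Nat) (occ : List Nat) (j : Nat) : Bool :=
  occ.any (fun p => decide (p ≤ j) && decide (j < p + m))

def maskFrom (e : List Char) (m : Nat) (occ : List Nat) (a : Nat) : List Char :=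
  (List.range' a (e.length - a)).map (fun j => if covB m occ j then e.getD j ' ' else '0')

def buildCore (e : List Char) : List (Nat × Nat) → Nat → List Char
  | [], _ => []
  | (l, r) :: rest, pos => List.replicate (l - pos) '0' ++ segN e l r ++ buildCore e rest r

def endPos : List (Nat × Nat) → Nat → Nat
  | [], a => a
  | (_, r) :: rest, _ => endPos rest r

def runsSum (e : List Char) : List (Nat × Nat) → Int
  | [] => 0
  | (l, r) :: rest => runsAux (segN e l r) false + runsSum e rest

def ivsOK (n : Nat) : List (Nat × Nat) → Nat → Prop
  | [], a => a ≤ n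
  | (l, r) :: rest, a => a ≤ l ∧ l ≤ r ∧ r ≤ n ∧ ivsOK n rest r

-- B's foldl over the cast merged intervals equals merging on Nat
lemma merge_fold_eq (m : Nat) :
    ∀ (occ : List Nat) (l r : Nat),
      (occ.map (fun k : Nat => (k : Int))).foldl (mstep (m : Int)) [((l : Int), (r : Int))]
        = ((l : Int), ((absorbN m r occ).1 : Int)) ::
            (mergeN m (absorbN m r occ).2).map (fun q => ((q.1 : Int), (q.2 : Int))) := by
  intro occ
  induction occ with
  | nil => intro l r; simp [absorbN, mergeN]
  | cons q ps ih =>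
    intro l r
    simp only [List.map_cons, List.foldl_cons]
    by_cases hq : q ≤ r
    · have hstep : mstep (m : Int) [((l : Int), (r : Int))] (q : Int)
          = [((l : Int), ((q + m : Nat) : Int))] := by
        unfold mstep
        rw [if_pos ⟨by simp, by
          rw [PySem.List.pyGetD_neg_one _ _ (by simp)]
          simpa using (by exact_mod_cast hq : (q : Int) ≤ (r : Int))⟩]
        rw [pySetD_neg_one_eq _ _ (by simp), PySem.List.pyGetD_neg_one _ _ (by simp)]
        simp
      rw [hstep, ih l (q + m)]
      rw [show absorbN m r (q :: ps) = absorbN m (q + m) ps from by simp [absorbN, hq]]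
    · have hstep : mstep (m : Int) [((l : Int), (r : Int))] (q : Int)
          = [((l : Int), (r : Int)), ((q : Int), ((q + m : Nat) : Int))] := by
        unfold mstep
        rw [if_neg (by
          rintro ⟨-, hle⟩
          rw [PySem.List.pyGetD_neg_one _ _ (by simp)] at hle
          simp at hle
          omega)]
        push_cast
        simp
      rw [hstep,
        show ([((l:Int),(r:Int)), ((q:Int),((q+m:Nat):Int))] : List (Int × Int))
          = [((l:Int),(r:Int))] ++ [((q:Int),((q+m:Nat):Int))] from rfl,
        foldl_mstep_append _ _ _ _ (by simp), ih q (q + m)]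
      rw [show absorbN m r (q :: ps) = (r, q :: ps) from by simp [absorbN, hq]]
      rw [show mergeN m (q :: ps) = (q, (absorbN m (q + m) ps).1) :: mergeN m (absorbN m (q + m) ps).2
        from by rw [mergeN]]
      simp

lemma merge_cast (m : Nat) (occ : List Nat) :
    altMerge (occ.map (fun k : Nat => (k : Int))) (m : Int)
      = (mergeN m occ).map (fun q => ((q.1 : Int), (q.2 : Int))) := by
  rw [altMerge_eq]
  cases occ with
  | nil => simp [mergeN]
  | cons p ps =>
    simp only [List.map_cons, List.foldl_cons]
    have hstep : mstep (m : Int) [] (p : Int) = [((p : Int), ((p + m : Nat) : Int))] := by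
      unfold mstep
      rw [if_neg (by simp)]
      push_cast
      simp
    rw [hstep, merge_fold_eq m ps p (p + m)]
    rw [show mergeN m (p :: ps) = (p, (absorbN m (p + m) ps).1) :: mergeN m (absorbN m (p + m) ps).2
      from by rw [mergeN]]
    simp

-- ---- absorb soaks up exactly the contiguous covered stretch ----
lemma absorbN_spec (m : Nat) :
    ∀ (ps : List Nat) (c : Nat), ps.Pairwise (· < ·) → (∀ q ∈ ps, c < q) →
      c + m ≤ (absorbN m (c + m) ps).1 ∧
      ((absorbN m (c + m) ps).1 = c + m ∨ ∃ q ∈ ps, (absorbN m (c + m) ps).1 = q + m) ∧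
      (∀ q ∈ (absorbN m (c + m) ps).2, (absorbN m (c + m) ps).1 < q) ∧
      ((absorbN m (c + m) ps).2).Sublist ps ∧
      (∀ j : Nat, ((c ≤ j ∧ j < c + m) ∨ ∃ q ∈ ps, q ≤ j ∧ j < q + m)
        ↔ ((c ≤ j ∧ j < (absorbN m (c + m) ps).1) ∨
            ∃ q ∈ (absorbN m (c + m) ps).2, q ≤ j ∧ j < q + m)) := by
  intro ps
  induction ps with
  | nil =>
    intro c _ _
    simp [absorbN]
  | cons q ps ih =>
    intro c hpw hc
    have hq : c < q := hc q (by simp)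
    have hps : ∀ q' ∈ ps, q < q' := fun q' h' => List.rel_of_pairwise_cons hpw h'
    by_cases hle : q ≤ c + m
    · rw [show absorbN m (c + m) (q :: ps) = absorbN m (q + m) ps from by simp [absorbN, hle]]
      obtain ⟨i1, i2, i3, i4, i5⟩ := ih q hpw.of_cons hps
      refine ⟨by omega, ?_, i3, i4.trans (List.sublist_cons_self q ps), ?_⟩
      · rcases i2 with h | ⟨q', hq', h⟩
        · exact Or.inr ⟨q, by simp, h⟩
        · exact Or.inr ⟨q', by simp [hq'], h⟩
      · intro j
        have hi5 := i5 j
        constructor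
        · rintro (h | ⟨q', hq', h⟩)
          · left; exact ⟨h.1, by omega⟩
          · rcases List.mem_cons.mp hq' with rfl | hmem
            · rcases hi5.mp (Or.inl h) with h' | h'
              · left; exact ⟨by omega, h'.2⟩
              · right; exact h'
            · rcases hi5.mp (Or.inr ⟨q', hmem, h⟩) with h' | h'
              · left; exact ⟨by omega, h'.2⟩
              · right; exact h'
        · rintro (h | ⟨q', hq', h⟩)
          · by_cases hjc : j < c + m
            · left; exact ⟨h.1, hjc⟩
            · rcases hi5.mpr (Or.inl ⟨by omega, h.2⟩) with h' | ⟨q'', hm'', h''⟩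
              · right; exact ⟨q, by simp, h'⟩
              · right; exact ⟨q'', by simp [hm''], h''⟩
          · rcases hi5.mpr (Or.inr ⟨q', hq', h⟩) with h' | ⟨q'', hm'', h''⟩
            · right; exact ⟨q, by simp, h'⟩
            · right; exact ⟨q'', by simp [hm''], h''⟩
    · rw [show absorbN m (c + m) (q :: ps) = (c + m, q :: ps) from by simp [absorbN, hle]]
      refine ⟨le_refl _, Or.inl rfl, ?_, List.Sublist.refl _, fun j => Iff.rfl⟩
      intro q' h'
      rcases List.mem_cons.mp h' with rfl | h''
      · omega
      · exact lt_trans (by omega) (hps q' h'')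

lemma cov_iff (m : Nat) (occ : List Nat) (j : Nat) :
    covB m occ j = true ↔ ∃ q ∈ occ, q ≤ j ∧ j < q + m := by
  simp [covB]

lemma mergeN_nil (m : Nat) : mergeN m [] = [] := by rw [mergeN]

lemma mask_nil (e : List Char) (m : Nat) (a : Nat) :
    maskFrom e m [] a = List.replicate (e.length - a) '0' := by
  unfold maskFrom
  rw [show (fun j => if covB m [] j then e.getD j ' ' else '0') = (fun _ : Nat => '0') from by
    funext j; rw [if_neg (by simp [covB])]]
  rw [List.map_const', List.length_range']

-- ---- run-count decompositions ----
lemma runs_rep (k : Nat) (xs : List Char) :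
    runsAux (List.replicate k '0' ++ xs) false = runsAux xs false := by
  induction k with
  | zero => rfl
  | succ k ih => simpa [List.replicate_succ, runsAux] using ih

lemma runs_append (xs ys : List Char) (hy : ys = [] ∨ ∃ t, ys = '0' :: t) :
    ∀ b, runsAux (xs ++ ys) b = runsAux xs b + runsAux ys false := by
  induction xs with
  | nil =>
    intro b
    rcases hy with rfl | ⟨t, rfl⟩
    · simp [runsAux]
    · simp [runsAux]
  | cons c xs ih =>
    intro b
    by_cases hc : c = '0'
    · simp only [List.cons_append, runsAux, if_pos hc]
      exact ih false
    · simp only [List.cons_append, runsAux, if_neg hc]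
      rw [ih true]
      ring

-- ---- the covered-position mask, pointwise ----
lemma covB_lt (m : Nat) (occ : List Nat) (j n : Nat) (hb : ∀ q ∈ occ, q + m ≤ n)
    (h : covB m occ j = true) : j < n := by
  simp only [covB, List.any_eq_true, Bool.and_eq_true, decide_eq_true_eq] at h
  obtain ⟨q, hq, h1, h2⟩ := h
  have := hb q hq
  omega

lemma runs_zeros (k : Nat) : runsAux (List.replicate k '0') false = 0 := by
  simpa using runs_rep k []

lemma segN_map (e : List Char) (l r : Nat) (hr : r ≤ e.length) :
    segN e l r = (List.range' l (r - l)).map (fun j => e.getD j ' ') := by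
  unfold segN
  apply List.ext_getElem
  · simp; omega
  · intro i h1 h2
    simp only [List.getElem_take, List.getElem_drop, List.getElem_map, List.getElem_range']
    simp only [List.length_take, List.length_drop, lt_min_iff] at h1
    rw [List.getD_eq_getElem e ' ' (by omega)]
    congr 1
    omega

-- inner marking loop: set positions p..p+k-1 to their entry characters
lemma inner_spec (e : List Char) :
    ∀ (k p : Nat) (t : List Char),
      ((List.range' p k).foldl (fun t j => t.set j (e.getD j ' ')) t).length = t.length ∧
      ∀ j : Nat, ((List.range' p k).foldl (fun t j => t.set j (e.getD j ' ')) t)[j]?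
        = if p ≤ j ∧ j < p + k then (if j < t.length then some (e.getD j ' ') else none) else t[j]? := by
  intro k
  induction k with
  | zero =>
    intro p t
    refine ⟨rfl, fun j => ?_⟩
    rw [if_neg (by omega)]
    rfl
  | succ k ih =>
    intro p t
    rw [List.range'_succ]
    simp only [List.foldl_cons]
    obtain ⟨ihl, ihg⟩ := ih (p + 1) (t.set p (e.getD p ' '))
    simp only [List.length_set] at ihl ihg
    refine ⟨ihl, fun j => ?_⟩
    rw [ihg j]
    by_cases h1 : p + 1 ≤ j ∧ j < p + 1 + k
    · rw [if_pos h1, if_pos (show p ≤ j ∧ j < p + (k + 1) from by omega)]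
    · rw [if_neg h1, List.getElem?_set]
      by_cases h2 : p = j
      · subst h2
        rw [if_pos rfl, if_pos (show p ≤ p ∧ p < p + (k + 1) from by omega)]
      · rw [if_neg h2, if_neg (by omega)]

-- outer marking fold over all occurrence positions
lemma mark_spec (e : List Char) (m : Nat) :
    ∀ (occ : List Nat) (t : List Char),
      (occ.foldl (fun t p => (List.range' p m).foldl (fun t j => t.set j (e.getD j ' ')) t) t).length
        = t.length ∧
      ∀ j : Nat,
        (occ.foldl (fun t p => (List.range' p m).foldl (fun t j => t.set j (e.getD j ' ')) t) t)[j]?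
          = if covB m occ j then (if j < t.length then some (e.getD j ' ') else none) else t[j]? := by
  intro occ
  induction occ with
  | nil =>
    intro t
    refine ⟨rfl, fun j => ?_⟩
    rw [if_neg (by simp [covB])]
    rfl
  | cons p ps ih =>
    intro t
    simp only [List.foldl_cons]
    obtain ⟨jl, jg⟩ := inner_spec e m p t
    obtain ⟨il, ig⟩ := ih ((List.range' p m).foldl (fun t j => t.set j (e.getD j ' ')) t)
    rw [jl] at il ig
    refine ⟨il, fun j => ?_⟩
    rw [ig j, jg j]
    by_cases h1 : covB m ps j = true
    · rw [h1, if_pos rfl, show covB m (p :: ps) j = true from by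
        simp only [covB, List.any_cons] at h1 ⊢
        simp [h1], if_pos rfl]
    · rw [show covB m ps j = false from by simpa using h1, if_neg (by simp)]
      by_cases h2 : p ≤ j ∧ j < p + m
      · rw [if_pos h2, show covB m (p :: ps) j = true from by
          simp only [covB, List.any_cons]
          simp [h2.1, h2.2], if_pos rfl]
      · have hfalse : covB m (p :: ps) j = false := by
          rw [show covB m (p :: ps) j = ((decide (p ≤ j) && decide (j < p + m)) || covB m ps j)
            from by simp [covB, List.any_cons]]
          rw [show covB m ps j = false from by simpa using h1]
          simp only [Bool.or_false, Bool.and_eq_false_iff]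
          by_cases hp : p ≤ j
          · right; simpa using fun h => h2 ⟨hp, h⟩
          · left; simpa using hp
        rw [if_neg h2, hfalse, if_neg (by simp)]

lemma pyRange_natCast' (p k : Nat) :
    PySem.List.pyRange (p : Int) ((p : Int) + (k : Int)) 1
      = (List.range' p k).map (fun j : Nat => (j : Int)) := by
  rw [PySem.List.pyRange_one]
  rw [show ((p : Int) + (k : Int) - (p : Int)).toNat = k from by omega]
  rw [List.range'_eq_map_range, List.map_map]
  apply List.map_congr_left
  intro j _
  simp

-- A's whole marking pass produces exactly the mask of covered positions
lemma mark_eq_mask (e : List Char) (m : Nat) (occ : List Nat) (hb : ∀ q ∈ occ, q + m ≤ e.length) :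
    occ.foldl (fun t p => (List.range' p m).foldl (fun t j => t.set j (e.getD j ' ')) t)
        (List.replicate e.length '0')
      = maskFrom e m occ 0 := by
  obtain ⟨hl, hg⟩ := mark_spec e m occ (List.replicate e.length '0')
  apply List.ext_getElem?
  intro j
  rw [hg j]
  by_cases hj : j < e.length
  · have hmask : (maskFrom e m occ 0)[j]? = some (if covB m occ j then e.getD j ' ' else '0') := by
      unfold maskFrom
      rw [List.getElem?_map, List.getElem?_range' (by omega)]
      simp
    rw [hmask]
    by_cases hc : covB m occ j = true
    · simp [hc, hj]
    · rw [show covB m occ j = false from by simpa using hc]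
      simp [hj]
  · have h1 : (maskFrom e m occ 0)[j]? = none := by
      unfold maskFrom
      rw [List.getElem?_eq_none]
      simp
      omega
    have hc : covB m occ j = false := by
      by_cases hc : covB m occ j = true
      · exact absurd (covB_lt m occ j e.length hb hc) hj
      · simpa using hc
    rw [h1, hc]
    simp [hj]

-- ---- main interval lemma: merged intervals produce the mask and its run count ----
lemma endPos_le (n : Nat) : ∀ (ivs : List (Nat × Nat)) (a : Nat), ivsOK n ivs a → endPos ivs a ≤ n := by
  intro ivs
  induction ivs with
  | nil => intro a h; exact h
  | cons q rest ih =>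
    intro a h
    obtain ⟨l, r⟩ := q
    exact ih r h.2.2.2

lemma mergeN_main (e : List Char) (m : Nat) (hm : 1 ≤ m) :
    ∀ (N : Nat) (occ : List Nat), occ.length ≤ N → occ.Pairwise (· < ·) →
      (∀ p ∈ occ, p + m ≤ e.length) → ∀ a : Nat, a ≤ e.length → (∀ p ∈ occ, a ≤ p) →
      ivsOK e.length (mergeN m occ) a ∧
      buildCore e (mergeN m occ) a ++
          List.replicate (e.length - endPos (mergeN m occ) a) '0' = maskFrom e m occ a ∧
      runsSum e (mergeN m occ) = runsAux (maskFrom e m occ a) false := by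
  intro N
  induction N with
  | zero =>
    intro occ hlen _ _ a ha _
    rw [show occ = [] from List.length_eq_zero_iff.mp (by omega)]
    rw [mergeN_nil]
    refine ⟨ha, ?_, ?_⟩
    · show ([] : List Char) ++ List.replicate (e.length - a) '0' = maskFrom e m [] a
      rw [mask_nil, List.nil_append]
    · show (0 : Int) = runsAux (maskFrom e m [] a) false
      rw [mask_nil, runs_zeros]
  | succ N ih =>
    intro occ hlen hpw hb a ha hlow
    cases occ with
    | nil =>
      rw [mergeN_nil]
      refine ⟨ha, ?_, ?_⟩
      · show ([] : List Char) ++ List.replicate (e.length - a) '0' = maskFrom e m [] a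
        rw [mask_nil, List.nil_append]
      · show (0 : Int) = runsAux (maskFrom e m [] a) false
        rw [mask_nil, runs_zeros]
    | cons p ps =>
      have hps : ∀ q ∈ ps, p < q := fun q h => List.rel_of_pairwise_cons hpw h
      obtain ⟨i1, i2, i3, i4, i5⟩ := absorbN_spec m ps p hpw.of_cons hps
      set r' := (absorbN m (p + m) ps).1 with hr'
      set rest := (absorbN m (p + m) ps).2 with hrest
      have hmq : mergeN m (p :: ps) = (p, r') :: mergeN m rest := by rw [mergeN]
      have hr'n : r' ≤ e.length := by
        rcases i2 with h | ⟨q, hq, h⟩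
        · rw [h]; exact hb p (by simp)
        · rw [h]; exact hb q (by simp [hq])
      have hap : a ≤ p := hlow p (by simp)
      have hpr' : p + m ≤ r' := i1
      have hrest_pw : rest.Pairwise (· < ·) := hpw.of_cons.sublist i4
      have hrest_b : ∀ q ∈ rest, q + m ≤ e.length := fun q h => hb q (by
        exact List.mem_cons_of_mem _ (i4.subset h))
      have hrest_low : ∀ q ∈ rest, r' ≤ q := fun q h => le_of_lt (i3 q h)
      have hrest_len : rest.length ≤ N := le_trans (absorbN_len m ps (p + m)) (by simpa using hlen)
      obtain ⟨IH1, IH2, IH3⟩ := ih rest hrest_len hrest_pw hrest_b r' hr'n hrest_low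
      -- coverage of p :: ps in the three zones
      have hcov : ∀ j : Nat, (covB m (p :: ps) j = true) ↔ ((p ≤ j ∧ j < r') ∨ covB m rest j = true) := by
        intro j
        rw [cov_iff, cov_iff]
        constructor
        · intro h
          have : (p ≤ j ∧ j < p + m) ∨ ∃ q ∈ ps, q ≤ j ∧ j < q + m := by
            obtain ⟨q, hq, h1, h2⟩ := h
            rcases List.mem_cons.mp hq with rfl | hmem
            · exact Or.inl ⟨h1, h2⟩
            · exact Or.inr ⟨q, hmem, h1, h2⟩
          rcases (i5 j).mp this with h' | h'
          · exact Or.inl h'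
          · exact Or.inr h'
        · intro h
          have : (p ≤ j ∧ j < p + m) ∨ ∃ q ∈ ps, q ≤ j ∧ j < q + m := (i5 j).mpr (by tauto)
          rcases this with h' | ⟨q, hq, h'⟩
          · exact ⟨p, by simp, h'⟩
          · exact ⟨q, by simp [hq], h'⟩
      have hzone1 : ∀ j, a ≤ j → j < p → covB m (p :: ps) j = false := by
        intro j _ hjp
        rw [Bool.eq_false_iff]
        intro hc
        rcases (hcov j).mp hc with h | h
        · omega
        · obtain ⟨q, hq, h1, h2⟩ := (cov_iff _ _ _).mp h
          have := hrest_low q hq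
          omega
      have hzone2 : ∀ j, p ≤ j → j < r' → covB m (p :: ps) j = true :=
        fun j h1 h2 => (hcov j).mpr (Or.inl ⟨h1, h2⟩)
      have hzone3 : ∀ j, r' ≤ j → covB m (p :: ps) j = covB m rest j := by
        intro j hj
        by_cases hc : covB m rest j = true
        · rw [hc]; exact (hcov j).mpr (Or.inr hc)
        · have h2 : covB m rest j = false := by simpa using hc
          have h1 : covB m (p :: ps) j = false := by
            rw [Bool.eq_false_iff]
            intro h
            rcases (hcov j).mp h with h' | h'
            · omega
            · exact hc h'
          rw [h1, h2]
      have hsplit : maskFrom e m (p :: ps) a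
          = List.replicate (p - a) '0' ++ segN e p r' ++ maskFrom e m rest r' := by
        unfold maskFrom
        have hr1 : List.range' a (e.length - a)
            = List.range' a (p - a) ++ List.range' p (r' - p) ++ List.range' r' (e.length - r') := by
          have h2 : List.range' p (r' - p) ++ List.range' r' (e.length - r')
              = List.range' p ((r' - p) + (e.length - r')) := by
            have h2' := @List.range'_append p (r' - p) (e.length - r') 1
            rw [one_mul, show p + (r' - p) = r' from by omega] at h2'
            exact h2'
          rw [List.append_assoc, h2]
          have := @List.range'_append a (p - a) ((r' - p) + (e.length - r')) 1
          simp only [one_mul] at this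
          rw [show a + (p - a) = p from by omega] at this
          rw [this]
          congr 1
          omega
        rw [hr1, List.map_append, List.map_append]
        congr 1
        · congr 1
          · have hcg : ∀ j ∈ List.range' a (p - a),
                (if covB m (p :: ps) j then e.getD j ' ' else '0') = (fun _ : Nat => '0') j := by
              intro j hj
              have hj' := List.mem_range'_1.mp hj
              simp [hzone1 j hj'.1 (by omega)]
            rw [List.map_congr_left hcg, List.map_const', List.length_range']
          · rw [segN_map e p r' hr'n]
            apply List.map_congr_left
            intro j hj
            have hj' := List.mem_range'_1.mp hj
            simp [hzone2 j hj'.1 (by omega)]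
        · apply List.map_congr_left
          intro j hj
          have hj' := List.mem_range'_1.mp hj
          rw [hzone3 j hj'.1]
      refine ⟨?_, ?_, ?_⟩
      · rw [hmq]
        exact ⟨hap, by omega, hr'n, IH1⟩
      · rw [hmq]
        show (List.replicate (p - a) '0' ++ segN e p r' ++ buildCore e (mergeN m rest) r')
            ++ List.replicate (e.length - endPos (mergeN m rest) r') '0' = _
        rw [hsplit]
        rw [List.append_assoc, List.append_assoc, ← List.append_assoc (segN e p r'), ← IH2]
        simp [List.append_assoc]
      · rw [hmq]
        show runsAux (segN e p r') false + runsSum e (mergeN m rest) = _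
        rw [hsplit, IH3]
        have htail : maskFrom e m rest r' = [] ∨ ∃ t, maskFrom e m rest r' = '0' :: t := by
          by_cases h0 : e.length - r' = 0
          · left; unfold maskFrom; rw [h0]; rfl
          · have hfalse : covB m rest r' = false := by
              rw [Bool.eq_false_iff]
              intro hc
              obtain ⟨q, hq, h1, h2⟩ := (cov_iff _ _ _).mp hc
              have := i3 q hq
              omega
            right
            unfold maskFrom
            rw [show e.length - r' = (e.length - r' - 1) + 1 from by omega, List.range'_succ,
              List.map_cons]
            exact ⟨_, by
              rw [show (if covB m rest r' then e.getD r' ' ' else '0') = '0' from by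
                simp [hfalse]]⟩
        rw [List.append_assoc, runs_rep, runs_append _ _ htail]

-- ---- B's building fold over cast intervals ----
lemma foldl_build (e : List Char) :
    ∀ (ivs : List (Nat × Nat)) (acc : List String) (a : Nat) (c : Int), ivsOK e.length ivs a →
      (ivs.map (fun q => ((q.1 : Int), (q.2 : Int)))).foldl
        (fun (acc : List String × Int × Int) lr =>
          (acc.1 ++ List.replicate (lr.1 - acc.2.1).toNat "0" ++
             (PySem.List.slice e (some lr.1) (some lr.2)).map String.singleton,
           lr.2,
           acc.2.2 + ((PySem.Str.split? (String.ofList (PySem.List.slice e (some lr.1) (some lr.2))) "0").getD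
               []).foldl (fun c w => if w ≠ "" then c + 1 else c) 0))
        (acc, (a : Int), c)
      = (acc ++ (buildCore e ivs a).map String.singleton, ((endPos ivs a : Nat) : Int),
          c + runsSum e ivs) := by
  intro ivs
  induction ivs with
  | nil =>
    intro acc a c _
    simp [buildCore, endPos, runsSum]
  | cons q rest ih =>
    intro acc a c hok
    obtain ⟨l, r⟩ := q
    obtain ⟨h1, h2, h3, h4⟩ := hok
    simp only [List.map_cons, List.foldl_cons]
    have hslice : PySem.List.slice e (some ((l : Nat) : Int)) (some ((r : Nat) : Int)) = segN e l r := by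
      rw [show ((r : Nat) : Int) = ((l : Nat) : Int) + ((r - l : Nat) : Int) from by omega]
      rw [PySem.List.slice_natCast_add]
      rfl
    have htn : (((l : Nat) : Int) - ((a : Nat) : Int)).toNat = l - a := by omega
    rw [hslice, htn, ih _ r _ h4]
    refine congrArg₂ Prod.mk ?_ (congrArg₂ Prod.mk rfl ?_)
    · show (acc ++ List.replicate (l - a) "0" ++ (segN e l r).map String.singleton)
          ++ (buildCore e rest r).map String.singleton = _
      rw [show buildCore e ((l, r) :: rest) a
          = List.replicate (l - a) '0' ++ segN e l r ++ buildCore e rest r from rfl]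
      rw [show List.replicate (l - a) "0" = (List.replicate (l - a) '0').map String.singleton from by
        rw [List.map_replicate]; rfl]
      simp [List.append_assoc]
    · show c + ((PySem.Str.split? (String.ofList (segN e l r)) "0").getD []).foldl
            (fun c w => if w ≠ "" then c + 1 else c) 0 + runsSum e rest = _
      rw [countSeg_eq, show runsSum e ((l, r) :: rest) = runsAux (segN e l r) false + runsSum e rest
        from rfl]
      ring

-- ---- assembling both sides ----
lemma main_eq (entry substring : String) (hs : substring.toList ≠ []) :
    get_island_count entry substring = get_island_count_alt entry substring := by
  have hm : 1 ≤ substring.toList.length := List.length_pos_iff.mpr hs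
  have hpw : ((List.range (entry.toList.length + 1)).filter
      (fun i => decide (substring.toList <+: List.drop i entry.toList))).Pairwise (· < ·) :=
    List.Pairwise.filter _ (List.pairwise_lt_range)
  have hb : ∀ p ∈ (List.range (entry.toList.length + 1)).filter
      (fun i => decide (substring.toList <+: List.drop i entry.toList)),
      p + substring.toList.length ≤ entry.toList.length := by
    intro p hp
    obtain ⟨hmem, hdec⟩ := List.mem_filter.mp hp
    have hple := List.mem_range.mp hmem
    have hpre : substring.toList <+: List.drop p entry.toList := by simpa using hdec
    have := hpre.length_le
    rw [List.length_drop] at this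
    omega
  obtain ⟨hOK, hbuild, hruns⟩ := mergeN_main entry.toList substring.toList.length hm
    ((List.range (entry.toList.length + 1)).filter
      (fun i => decide (substring.toList <+: List.drop i entry.toList))).length
    _ le_rfl hpw hb 0 (Nat.zero_le _) (fun _ _ => Nat.zero_le _)
  have hep := endPos_le entry.toList.length _ _ hOK
  -- ---- A side ----
  simp only [get_island_count, get_island_count_alt, altOccurrences]
  have hlenE : PySem.Str.len entry = ((entry.toList.length : Nat) : Int) := by
    simp [PySem.Str.len]
  have hlenS : PySem.Str.len substring = ((substring.toList.length : Nat) : Int) := by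
    simp [PySem.Str.len]
  rw [hlenE, hlenS, PySem.List.pyRange_zero_nat]
  rw [PySem.List.foldl_ite_eq_foldl_filter
    (p := fun i : Int => PySem.List.pyGet? entry.toList i = PySem.List.pyGet? substring.toList 0 ∧
      PySem.List.slice entry.toList (some i) (some (i + (substring.toList.length : Int))) =
        PySem.List.slice substring.toList (some 0) (some (substring.toList.length : Int)))
    (f := fun tmp i =>
      (PySem.List.pyRange i (i + (substring.toList.length : Int)) 1).foldl
        (fun t j => PySem.List.pySetD t j (String.singleton (PySem.List.pyGetD entry.toList j ' ')))
        tmp)]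
  rw [List.filter_map]
  rw [show ((fun i : Int => decide (PySem.List.pyGet? entry.toList i = PySem.List.pyGet? substring.toList 0 ∧
        PySem.List.slice entry.toList (some i) (some (i + (substring.toList.length : Int))) =
          PySem.List.slice substring.toList (some 0) (some (substring.toList.length : Int)))) ∘
      (fun k : Nat => (k : Int)))
      = fun k : Nat => decide (PySem.List.pyGet? entry.toList (k : Int) = PySem.List.pyGet? substring.toList 0 ∧
        PySem.List.slice entry.toList (some (k : Int)) (some ((k : Int) + (substring.toList.length : Int))) =
          PySem.List.slice substring.toList (some 0) (some (substring.toList.length : Int)))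
    from rfl]
  rw [occ_eq entry.toList substring.toList hs]
  have hnn : ∀ p ∈ ((List.range (entry.toList.length + 1)).filter
      (fun i => decide (substring.toList <+: List.drop i entry.toList))).map
        (fun k : Nat => (k : Int)), (0 : Int) ≤ p := by
    intro p hp
    obtain ⟨k, -, rfl⟩ := List.mem_map.mp hp
    exact Int.natCast_nonneg k
  have hinit : PySem.List.pyRepeat ["0"] ((entry.toList.length : Nat) : Int)
      = (List.replicate entry.toList.length '0').map String.singleton := by
    rw [PySem.List.pyRepeat_singleton]
    simp only [Int.toNat_natCast, List.map_replicate]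
    rfl
  rw [hinit, markFold_sing entry.toList (substring.toList.length : Int) _ hnn]
  rw [List.foldl_map]
  simp only [pyRange_natCast', List.foldl_map, PySem.List.pySetD_natCast,
    PySem.List.pyGetD_natCast]
  rw [show (fun (tmp : List Char) (x : Nat) =>
        List.foldl (fun t j => t.set j (entry.toList.getD j ' ')) tmp
          (List.range' x substring.toList.length))
      = (fun t p => (List.range' p substring.toList.length).foldl
          (fun t j => t.set j (entry.toList.getD j ' ')) t) from rfl]
  rw [mark_eq_mask entry.toList substring.toList.length _ hb]
  rw [countA_eq]
  -- ---- B side ----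
  rw [if_neg hs]
  rw [starts_eq entry.toList substring.toList hs]
  rw [merge_cast substring.toList.length]
  have hfb := foldl_build entry.toList
    (mergeN substring.toList.length
      ((List.range (entry.toList.length + 1)).filter
        (fun i => decide (substring.toList <+: List.drop i entry.toList))))
    [] 0 0 hOK
  simp only [Nat.cast_zero, List.nil_append] at hfb
  rw [hfb]
  rw [show ((entry.toList.length : Nat) : Int) -
        ((endPos (mergeN substring.toList.length
          ((List.range (entry.toList.length + 1)).filter
            (fun i => decide (substring.toList <+: List.drop i entry.toList)))) 0 : Nat) : Int)
      = (((entry.toList.length -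
          endPos (mergeN substring.toList.length
            ((List.range (entry.toList.length + 1)).filter
              (fun i => decide (substring.toList <+: List.drop i entry.toList)))) 0 : Nat)) : Int)
    from by omega]
  rw [Int.toNat_natCast]
  rw [show (List.replicate (entry.toList.length -
        endPos (mergeN substring.toList.length
          ((List.range (entry.toList.length + 1)).filter
            (fun i => decide (substring.toList <+: List.drop i entry.toList)))) 0) "0")
      = (List.replicate (entry.toList.length -
          endPos (mergeN substring.toList.length
            ((List.range (entry.toList.length + 1)).filter
              (fun i => decide (substring.toList <+: List.drop i entry.toList)))) 0) '0').map
          String.singleton from by rw [List.map_replicate]; rfl]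
  rw [← List.map_append, hbuild, hruns]
  rw [zero_add]

-- ===== VERDICT (by name: the statement is the Claim_ definition above) =====
theorem get_island_count_spec : Claim_equal_get_island_count := by
  intro entry substring _ hpre
  unfold Spec_get_island_count
  by_cases hsub : substring = ""
  · have hent : entry = "" := by
      rcases hpre with h | h
      · exact absurd hsub h
      · exact h
    subst hsub; subst hent
    decide
  · exact main_eq entry substring (fun h => hsub (by
      have := congrArg String.ofList h
      simpa using this))
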